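-- pv_equiv track=rewrite | github.com/gourishankerJK/NPTEL-Programming-Data-Structures-And-Algorithms-Using-Python-2020-SOLUTIONS | WEEK 4 PROGRAMMING ASSIGNMENT.py | onehop
-- ===== SOURCE A (Python) =====
-- def onehop(l):
--     li =[]
--     for i in range(len(l)):
--         for j in range(len(l)):
--             if l[i][0] != l[j][1] and l[i][1]==l[j][0] :
--                     li.append((l[i][0],l[j][1]))
--     li = list(set(li))
--     li = sorted(li)
--
--     return li
-- ===== SOURCE B (Python) =====
-- def onehop(l):
--     # group destinations by source node, then cross each edge with the
--     # out-neighbours of its destination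
--     succ = {}
--     for e in l:
--         succ.setdefault(e[0], []).append(e[1])
--     res = set()
--     for e in l:
--         a = e[0]
--         for c in succ.get(e[1], ()):
--             if a != c:
--                 res.add((a, c))
--     return sorted(res)
-- ===== Notes on version B (the rewrite author's own statement) =====
-- stated objective: faster
-- what changed: Replaces A's O(E^2) all-pairs edge comparison by a one-pass dict grouping destinations by source node, then crossing each edge only with the out-neighbours of its destination; duplicates go into a set that is sorted at the end.
import Mathlib
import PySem

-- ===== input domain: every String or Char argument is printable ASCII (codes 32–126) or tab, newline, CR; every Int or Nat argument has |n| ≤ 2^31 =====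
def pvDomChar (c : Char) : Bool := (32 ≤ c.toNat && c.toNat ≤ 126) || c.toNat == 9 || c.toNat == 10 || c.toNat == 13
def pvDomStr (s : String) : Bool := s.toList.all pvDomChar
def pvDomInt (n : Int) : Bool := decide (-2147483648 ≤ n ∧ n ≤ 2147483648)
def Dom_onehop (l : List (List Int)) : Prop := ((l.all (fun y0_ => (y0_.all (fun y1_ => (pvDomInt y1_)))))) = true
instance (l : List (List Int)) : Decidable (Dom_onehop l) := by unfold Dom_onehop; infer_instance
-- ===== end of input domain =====

-- B replaces A's quadratic all-pairs edge scan by grouping edge destinations by source node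
-- (a dict) and crossing each edge only with the out-neighbours of its destination (objective: faster).

-- ===== PORT A =====
def onehop (l : List (List Int)) : List (Int × Int) :=
  let li : List (Int × Int) :=
    (PySem.List.pyRange 0 (l.length : Int) 1).foldl (fun acc i =>
      (PySem.List.pyRange 0 (l.length : Int) 1).foldl (fun acc j =>
        if PySem.List.pyGetD (PySem.List.pyGetD l i []) 0 0 ≠ PySem.List.pyGetD (PySem.List.pyGetD l j []) 1 0
            ∧ PySem.List.pyGetD (PySem.List.pyGetD l i []) 1 0 = PySem.List.pyGetD (PySem.List.pyGetD l j []) 0 0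
        then acc ++ [(PySem.List.pyGetD (PySem.List.pyGetD l i []) 0 0,
                      PySem.List.pyGetD (PySem.List.pyGetD l j []) 1 0)]
        else acc) acc) []
  PySem.List.sorted2 (PySem.Set.ofList li) (fun p => p.1) (fun p => p.2) false

-- ===== PORT B =====
def onehop_alt (l : List (List Int)) : List (Int × Int) :=
  -- succ.setdefault(e[0], []).append(e[1])
  let succ : PySem.Dict Int (List Int) :=
    l.foldl (fun d e =>
      d.insert (PySem.List.pyGetD e 0 0) (d.getD (PySem.List.pyGetD e 0 0) [] ++ [PySem.List.pyGetD e 1 0]))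
      PySem.Dict.empty
  let res : PySem.Set (Int × Int) :=
    l.foldl (fun s e =>
      (succ.getD (PySem.List.pyGetD e 1 0) []).foldl (fun s c =>
        if PySem.List.pyGetD e 0 0 ≠ c then PySem.Set.add s (PySem.List.pyGetD e 0 0, c) else s) s)
      []
  PySem.List.sorted2 res (fun p => p.1) (fun p => p.2) false

-- ===== PRECONDITION & SPEC =====
-- Pre_ excludes exactly the inputs on which the Python A raises IndexError: an inner list
-- with fewer than two entries.
def Pre_onehop (l : List (List Int)) : Prop := ∀ e ∈ l, 2 ≤ e.length
instance (l : List (List Int)) : Decidable (Pre_onehop l) := by unfold Pre_onehop; infer_instance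
def pvWitness_onehop : List (List Int) := [[1, 2], [2, 3], [2, 1]]

def Spec_onehop (l : List (List Int)) (out : List (Int × Int)) : Prop := out = onehop_alt l
instance (l : List (List Int)) (out : List (Int × Int)) : Decidable (Spec_onehop l out) := by unfold Spec_onehop; infer_instance

-- ===== CLAIM (what is proved, stated in full; the proofs are below) =====
def Claim_equal_onehop : Prop := ∀ (l : List (List Int)), Dom_onehop l → Pre_onehop l → Spec_onehop l (onehop l)

-- ===== LEMMAS AND PROOFS =====

-- sorted2 with component keys is sorted with the lexicographic key
theorem sorted2_eq_sorted_lex (xs : List (Int × Int)) :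
    PySem.List.sorted2 xs (fun p => p.1) (fun p => p.2) false
      = PySem.List.sorted xs (fun p => (toLex p : Int ×ₗ Int)) false := by
  show xs.foldl (fun acc x => PySem.List.insertBy (fun a b =>
      decide (a.1 < b.1) || (!decide (b.1 < a.1) && decide (a.2 < b.2))) x acc) [] =
    xs.foldl (fun acc x => PySem.List.insertBy (fun a b =>
      decide ((toLex a : Int ×ₗ Int) < toLex b)) x acc) []
  congr 1
  funext acc x
  congr 1
  funext a b
  by_cases h1 : a.1 < b.1 <;> by_cases h2 : b.1 < a.1 <;> by_cases h3 : a.2 < b.2 <;>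
    simp [Prod.Lex.lt_iff, h1, h2, h3] <;> omega

theorem mem_fold_add (cs : List Int) (a : Int) (s : PySem.Set (Int × Int)) (x : Int × Int) :
    (x ∈ cs.foldl (fun s c => if a ≠ c then PySem.Set.add s (a, c) else s) s)
      ↔ x ∈ s ∨ ∃ c ∈ cs, a ≠ c ∧ x = (a, c) := by
  induction cs generalizing s with
  | nil => simp
  | cons c cs ih =>
    simp only [List.foldl_cons, ih, List.mem_cons]
    by_cases h : a = c
    · simp [h]
    · simp [h, PySem.Set.mem_add]
      tauto

theorem nodup_fold_add (cs : List Int) (a : Int) (s : PySem.Set (Int × Int)) (hs : s.Nodup) :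
    (cs.foldl (fun s c => if a ≠ c then PySem.Set.add s (a, c) else s) s).Nodup := by
  induction cs generalizing s with
  | nil => exact hs
  | cons c cs ih =>
    simp only [List.foldl_cons]
    apply ih
    split_ifs
    · exact PySem.Set.nodup_add s _ hs
    · exact hs

theorem mem_fold2 (l' : List (List Int)) (d : PySem.Dict Int (List Int))
    (s : PySem.Set (Int × Int)) (x : Int × Int) :
    (x ∈ l'.foldl (fun s e =>
        (d.getD (PySem.List.pyGetD e 1 0) []).foldl (fun s c =>
          if PySem.List.pyGetD e 0 0 ≠ c then PySem.Set.add s (PySem.List.pyGetD e 0 0, c) else s) s) s)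
      ↔ x ∈ s ∨ ∃ e ∈ l', ∃ c ∈ d.getD (PySem.List.pyGetD e 1 0) [],
          PySem.List.pyGetD e 0 0 ≠ c ∧ x = (PySem.List.pyGetD e 0 0, c) := by
  induction l' generalizing s with
  | nil => simp
  | cons e l' ih =>
    simp only [List.foldl_cons, ih, mem_fold_add, List.mem_cons]
    constructor
    · rintro ((h | h) | ⟨e', he', h⟩)
      · exact Or.inl h
      · exact Or.inr ⟨e, Or.inl rfl, h⟩
      · exact Or.inr ⟨e', Or.inr he', h⟩
    · rintro (h | ⟨e', rfl | he', h⟩)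
      · exact Or.inl (Or.inl h)
      · exact Or.inl (Or.inr h)
      · exact Or.inr ⟨e', he', h⟩

theorem nodup_fold2 (l' : List (List Int)) (d : PySem.Dict Int (List Int))
    (s : PySem.Set (Int × Int)) (hs : s.Nodup) :
    (l'.foldl (fun s e =>
        (d.getD (PySem.List.pyGetD e 1 0) []).foldl (fun s c =>
          if PySem.List.pyGetD e 0 0 ≠ c then PySem.Set.add s (PySem.List.pyGetD e 0 0, c) else s) s) s).Nodup := by
  induction l' generalizing s with
  | nil => exact hs
  | cons e l' ih => exact ih _ (nodup_fold_add _ _ _ hs)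

theorem dict_getD (l' : List (List Int)) (d : PySem.Dict Int (List Int)) (b : Int) :
    (l'.foldl (fun d e =>
        d.insert (PySem.List.pyGetD e 0 0)
          (d.getD (PySem.List.pyGetD e 0 0) [] ++ [PySem.List.pyGetD e 1 0])) d).getD b []
      = d.getD b [] ++
        (l'.filter (fun e => PySem.List.pyGetD e 0 0 == b)).map (fun e => PySem.List.pyGetD e 1 0) := by
  induction l' generalizing d with
  | nil => simp
  | cons e l' ih =>
    simp only [List.foldl_cons, ih, PySem.Dict.getD_insert]
    by_cases h : PySem.List.pyGetD e 0 0 = b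
    · simp [h]
    · simp [h, Ne.symm h]

theorem filter_map_pyRange {β : Type} (p : List Int → Prop) [DecidablePred p]
    (g : List Int → β) (l : List (List Int)) :
    ((PySem.List.pyRange 0 (l.length : Int) 1).filter
        (fun j => decide (p (PySem.List.pyGetD l j [])))).map
      (fun j => g (PySem.List.pyGetD l j []))
    = (l.filter (fun e => decide (p e))).map g := by
  conv_rhs => rw [← PySem.List.map_pyGetD_pyRange_zero' l []]
  rw [List.filter_map, List.map_map]
  rfl

theorem li_flatMap (l : List (List Int)) :
    ((PySem.List.pyRange 0 (l.length : Int) 1).foldl (fun acc i =>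
      (PySem.List.pyRange 0 (l.length : Int) 1).foldl (fun acc j =>
        if PySem.List.pyGetD (PySem.List.pyGetD l i []) 0 0 ≠ PySem.List.pyGetD (PySem.List.pyGetD l j []) 1 0
            ∧ PySem.List.pyGetD (PySem.List.pyGetD l i []) 1 0 = PySem.List.pyGetD (PySem.List.pyGetD l j []) 0 0
        then acc ++ [(PySem.List.pyGetD (PySem.List.pyGetD l i []) 0 0,
                      PySem.List.pyGetD (PySem.List.pyGetD l j []) 1 0)]
        else acc) acc) ([] : List (Int × Int)))
    = l.flatMap (fun ei =>
        (l.filter (fun ej => decide (PySem.List.pyGetD ei 0 0 ≠ PySem.List.pyGetD ej 1 0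
            ∧ PySem.List.pyGetD ei 1 0 = PySem.List.pyGetD ej 0 0))).map
          (fun ej => (PySem.List.pyGetD ei 0 0, PySem.List.pyGetD ej 1 0))) := by
  rw [PySem.List.foldl_pyRange_zero_pyGetD' l [] (f := fun acc ei =>
    (PySem.List.pyRange 0 (l.length : Int) 1).foldl (fun acc j =>
      if PySem.List.pyGetD ei 0 0 ≠ PySem.List.pyGetD (PySem.List.pyGetD l j []) 1 0
          ∧ PySem.List.pyGetD ei 1 0 = PySem.List.pyGetD (PySem.List.pyGetD l j []) 0 0
      then acc ++ [(PySem.List.pyGetD ei 0 0, PySem.List.pyGetD (PySem.List.pyGetD l j []) 1 0)]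
      else acc) acc)]
  simp only [PySem.List.foldl_append_ite, PySem.List.foldl_append_eq_flatMap, List.nil_append]
  congr 1
  funext ei
  exact filter_map_pyRange
    (fun ej => PySem.List.pyGetD ei 0 0 ≠ PySem.List.pyGetD ej 1 0
      ∧ PySem.List.pyGetD ei 1 0 = PySem.List.pyGetD ej 0 0)
    (fun ej => (PySem.List.pyGetD ei 0 0, PySem.List.pyGetD ej 1 0)) l

-- ===== VERDICT (by name: the statement is the Claim_ definition above) =====
theorem onehop_spec : Claim_equal_onehop := by
  unfold Claim_equal_onehop
  intro l _ _
  unfold Spec_onehop onehop onehop_alt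
  simp only [li_flatMap]
  rw [sorted2_eq_sorted_lex, sorted2_eq_sorted_lex]
  apply PySem.List.sorted_eq_sorted_of_perm
  · intro a b h
    simpa using h
  · rw [List.perm_ext_iff_of_nodup (PySem.Set.nodup_ofList _) (nodup_fold2 _ _ _ (by simp))]
    intro x
    rw [PySem.Set.mem_ofList, mem_fold2]
    simp only [List.mem_flatMap, List.mem_map, List.mem_filter, dict_getD,
      PySem.Dict.getD_empty, List.nil_append, decide_eq_true_eq, beq_iff_eq,
      List.not_mem_nil, false_or]
    constructor
    · rintro ⟨ei, hei, ej, ⟨hej, hne, heq⟩, rfl⟩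
      exact ⟨ei, hei, _, ⟨ej, ⟨hej, heq.symm⟩, rfl⟩, hne, rfl⟩
    · rintro ⟨e, he, c, ⟨e', ⟨he', hb⟩, rfl⟩, hne, rfl⟩
      exact ⟨e, he, e', ⟨he', hne, hb.symm⟩, rfl⟩
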